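-- pv_equiv track=rewrite | github.com/bichnln/LeetCode | p1009-ComplementOfBase10Int/p1009.py | ComplementOfInt
-- ===== SOURCE A (Python) =====
-- def ComplementOfInt(n: int) -> int:
--    result = 0
--    t = 0
--    if n == 0 or n == 2:
--       return 1
--    elif n == 1:
--       return 0
--    else:
--       while n >= 2:
--          if n % 2 == 0:
--             result += pow(2, t)
--          t += 1
--          n = n//2
--       return result
-- ===== SOURCE B (Python) =====
-- def ComplementOfInt(n: int) -> int:
--     # Closed form: flip every bit within n's bit length via a mask XOR.
--     if n <= 0:
--         return 1 if n == 0 else 0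
--     return n ^ ((1 << n.bit_length()) - 1)
-- ===== Notes on version B (the rewrite author's own statement) =====
-- stated objective: simpler
-- what changed: Replaces A's bit-by-bit while loop (accumulating pow(2,t) for each zero bit) with a closed-form mask XOR n ^ ((1 << n.bit_length()) - 1), keeping only the guard for nonpositive input.
import Mathlib
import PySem

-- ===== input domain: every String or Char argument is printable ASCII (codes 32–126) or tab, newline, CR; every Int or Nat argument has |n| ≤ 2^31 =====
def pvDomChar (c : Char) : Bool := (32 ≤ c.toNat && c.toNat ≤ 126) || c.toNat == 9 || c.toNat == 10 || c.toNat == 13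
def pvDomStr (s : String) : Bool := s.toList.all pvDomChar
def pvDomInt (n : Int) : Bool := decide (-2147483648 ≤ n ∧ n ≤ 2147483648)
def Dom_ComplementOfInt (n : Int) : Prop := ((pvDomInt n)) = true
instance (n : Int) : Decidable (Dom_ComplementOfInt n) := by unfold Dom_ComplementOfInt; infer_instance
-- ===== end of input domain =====

-- B replaces A's bit-by-bit accumulation loop by a closed-form mask XOR (n ^ ((1 << n.bit_length()) - 1)); objective: simpler.

-- ===== PORT A =====
-- the while-loop of A, state (n, result, t)
def pvLoopA (n result : Int) (t : Nat) : Int :=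
  if h : 2 ≤ n then
    pvLoopA (PySem.Int.floordiv n 2)
      (if PySem.Int.mod n 2 = 0 then result + 2 ^ t else result) (t + 1)
  else result
termination_by n.toNat
decreasing_by
  rw [PySem.Int.floordiv_eq_ediv_of_pos (a := n) (by omega : (0:Int) < 2)]
  omega

def ComplementOfInt (n : Int) : Int :=
  if n = 0 ∨ n = 2 then 1
  else if n = 1 then 0
  else pvLoopA n 0 0

-- ===== PORT B =====
def ComplementOfInt_alt (n : Int) : Int :=
  if n ≤ 0 then (if n = 0 then 1 else 0)
  else PySem.Int.bxor n ((1 <<< PySem.Int.bitLength n) - 1)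

-- ===== PRECONDITION & SPEC =====
def Spec_ComplementOfInt (n : Int) (out : Int) : Prop := out = ComplementOfInt_alt n
instance (n : Int) (out : Int) : Decidable (Spec_ComplementOfInt n out) := by unfold Spec_ComplementOfInt; infer_instance

-- ===== CLAIM (what is proved, stated in full; the proofs are below) =====
def Claim_equal_ComplementOfInt : Prop := ∀ (n : Int), Dom_ComplementOfInt n → Spec_ComplementOfInt n (ComplementOfInt n)

-- ===== LEMMAS AND PROOFS =====

-- XOR with a full mask of k ones is subtraction from the mask
theorem pvNatXorMask (k : Nat) : ∀ m : Nat, m < 2 ^ k → m ^^^ (2 ^ k - 1) = 2 ^ k - 1 - m := by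
  induction k with
  | zero => intro m hm; interval_cases m; decide
  | succ k ih =>
    intro m hm
    have hp : 2 ^ (k + 1) = 2 * 2 ^ k := by ring
    have h2k : 0 < 2 ^ k := Nat.pow_pos (by omega)
    have hmask : (2 ^ (k + 1) - 1) / 2 = 2 ^ k - 1 := by omega
    have hdiv : (m ^^^ (2 ^ (k + 1) - 1)) / 2 = (m / 2) ^^^ (2 ^ k - 1) := by
      rw [Nat.xor_div_two, hmask]
    have hih := ih (m / 2) (by omega)
    have hmod : (m ^^^ (2 ^ (k + 1) - 1)) % 2 = (m + (2 ^ (k + 1) - 1)) % 2 :=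
      Nat.xor_mod_two_eq
    have hx := Nat.div_add_mod (m ^^^ (2 ^ (k + 1) - 1)) 2
    omega

-- the loop adds, scaled by 2^t, the complement of n within its bit length
theorem pvLoopA_eq (m : Nat) : ∀ (n result : Int) (t : Nat), n.toNat = m → 1 ≤ n →
    pvLoopA n result t = result + 2 ^ t * ((2 : Int) ^ PySem.Int.bitLength n - 1 - n) := by
  induction m using Nat.strong_induction_on with
  | _ m ih =>
    intro n result t hm hn
    rw [pvLoopA]
    by_cases h2 : 2 ≤ n
    · simp only [h2, dite_true]
      have hfd : PySem.Int.floordiv n 2 = n / 2 :=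
        PySem.Int.floordiv_eq_ediv_of_pos (by omega)
      have hmd : PySem.Int.mod n 2 = n % 2 :=
        PySem.Int.mod_eq_emod_of_pos (by omega)
      have hbl : PySem.Int.bitLength n = PySem.Int.bitLength (PySem.Int.floordiv n 2) + 1 :=
        PySem.Int.bitLength_of_pos (by omega)
      have hq := Int.mul_ediv_add_emod n 2
      have hr : n % 2 = 0 ∨ n % 2 = 1 := by omega
      obtain ⟨q, hq2⟩ : ∃ q : Int, n / 2 = q := ⟨n / 2, rfl⟩
      rw [hfd, hmd, hbl, hfd,
        ih (n / 2).toNat (by omega) (n / 2) _ (t + 1) rfl (by omega), hq2]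
      have hn2 : n = 2 * q + n % 2 := by omega
      rcases hr with h | h <;> rw [h] at hn2 <;> simp only [h] <;> norm_num <;>
        rw [hn2] <;> ring
    · have hn1 : n = 1 := by omega
      subst hn1
      simp only [h2, dite_false]
      have hb : PySem.Int.bitLength (1 : Int) = 1 := by decide
      rw [hb]; ring

-- ===== VERDICT (by name: the statement is the Claim_ definition above) =====
theorem ComplementOfInt_spec : Claim_equal_ComplementOfInt := by
  intro n _
  unfold Spec_ComplementOfInt ComplementOfInt ComplementOfInt_alt
  by_cases h0 : n = 0
  · subst h0; decide
  by_cases h2 : n = 2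
  · subst h2; decide
  by_cases h1 : n = 1
  · subst h1; decide
  simp only [h0, h1, h2, or_self, if_false]
  by_cases hneg : n ≤ 0
  · rw [pvLoopA]
    simp only [show ¬ (2 ≤ n) by omega, dite_false, if_pos hneg]
  · -- n ≥ 3
    simp only [if_neg hneg]
    have hn1 : 1 ≤ n := by omega
    rw [pvLoopA_eq n.toNat n 0 0 rfl hn1]
    have hL := PySem.Int.lt_two_pow_bitLength n
    have habs : n.natAbs = n.toNat := by omega
    rw [habs] at hL
    set L := PySem.Int.bitLength n with hLdef
    have hshift : (((1 <<< L : Nat) : Int)) = (2 : Int) ^ L := by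
      simp [Nat.shiftLeft_eq]
    rw [hshift]
    have hxor : PySem.Int.bxor n ((2 : Int) ^ L - 1) =
        ((n.toNat ^^^ ((2 : Int) ^ L - 1).toNat : Nat) : Int) :=
      PySem.Int.bxor_of_nonneg (by omega) (by have h : (0:Int) < 2 ^ L := pow_pos (by norm_num) L; omega)
    have hmt : ((2 : Int) ^ L - 1).toNat = 2 ^ L - 1 := by
      have : ((2 : Int) ^ L) = ((2 ^ L : Nat) : Int) := by push_cast; ring
      omega
    rw [hxor, hmt, pvNatXorMask L n.toNat hL]
    have : ((2 : Int) ^ L) = ((2 ^ L : Nat) : Int) := by push_cast; ring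
    omega
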